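-- pv_equiv track=rewrite | github.com/AmanoTeam/Unalix | unalix/utils.py | unquote_unreserved
-- ===== SOURCE A (Python) =====
-- UNRESERVED_SET = frozenset(
-- 	"ABCDEFGHIJKLMNOPQRSTUVWXYZabcdefghijklmnopqrstuvwxyz" + "0123456789-._~")
--
-- def unquote_unreserved(uri: str) -> str:
-- 	"""Un-escape any percent-escape sequences in a URI that are unreserved
-- 	characters. This leaves all reserved, illegal and non-ASCII bytes encoded.
-- 	"""
-- 	parts = uri.split('%')
-- 	for i in range(1, len(parts)):
-- 		h = parts[i][0:2]
-- 		if len(h) == 2 and h.isalnum():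
-- 			c = chr(int(h, 16))
-- 			if c in UNRESERVED_SET:
-- 				parts[i] = c + parts[i][2:]
-- 			else:
-- 				parts[i] = '%' + parts[i]
-- 		else:
-- 			parts[i] = '%' + parts[i]
-- 	return ''.join(parts)
-- ===== SOURCE B (Python) =====
-- UNRESERVED_SET = frozenset(
-- 	"ABCDEFGHIJKLMNOPQRSTUVWXYZabcdefghijklmnopqrstuvwxyz" + "0123456789-._~")
--
-- def unquote_unreserved(uri: str) -> str:
-- 	"""Single left-to-right scan with an explicit cursor: no split/join,
-- 	no intermediate parts list."""
-- 	out = []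
-- 	i = 0
-- 	n = len(uri)
-- 	while i < n:
-- 		ch = uri[i]
-- 		if ch == '%':
-- 			h = uri[i + 1:i + 3]
-- 			if len(h) == 2 and h.isalnum():
-- 				c = chr(int(h, 16))
-- 				if c in UNRESERVED_SET:
-- 					out.append(c)
-- 					i += 3
-- 					continue
-- 			out.append('%')
-- 			i += 1
-- 		else:
-- 			out.append(ch)
-- 			i += 1
-- 	return ''.join(out)
-- ===== Notes on version B (the rewrite author's own statement) =====
-- stated objective: alternative
-- what changed: Replaced A's three-phase pipeline (split on the percent character, rewrite each part, join the parts) by a single left-to-right scan with an explicit cursor that never materialises the parts list.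
-- outside the precondition, e.g. on unquote_unreserved('%zz'): A raises ValueError, B raises ValueError
import Mathlib
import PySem

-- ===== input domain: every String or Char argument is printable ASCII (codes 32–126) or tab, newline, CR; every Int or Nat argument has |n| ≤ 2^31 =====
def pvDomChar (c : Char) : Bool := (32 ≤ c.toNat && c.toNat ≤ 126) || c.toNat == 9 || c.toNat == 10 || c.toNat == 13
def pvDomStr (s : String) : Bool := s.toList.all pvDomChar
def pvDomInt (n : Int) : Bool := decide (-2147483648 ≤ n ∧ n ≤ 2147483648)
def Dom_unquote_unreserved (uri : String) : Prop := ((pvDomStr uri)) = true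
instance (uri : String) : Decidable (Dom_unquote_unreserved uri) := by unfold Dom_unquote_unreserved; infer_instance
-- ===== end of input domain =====

-- B replaces A's split('%')/rewrite/join pipeline by one left-to-right cursor scan (alternative decomposition, same cost).


-- ===== PORT A =====
-- UNRESERVED_SET (a frozenset constant; used for membership tests only)
def pvUNRESERVED : List Char :=
  ("ABCDEFGHIJKLMNOPQRSTUVWXYZabcdefghijklmnopqrstuvwxyz" ++ "0123456789-._~").toList

-- chr(int(h, 16)); total form: the .getD 0 default is only reached where Python raises
-- ValueError, which Pre_unquote_unreserved excludes
def pvDecode (h : List Char) : Char :=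
  Char.ofNat ((PySem.Int.ofCharsBase? h 16).getD 0).toNat

-- the body of A's loop: what A stores back into parts[i] (i ≥ 1)
def pvPartA (p : List Char) : List Char :=
  let h := PySem.List.slice p (some 0) (some 2)
  if h.length = 2 && PySem.Chars.strIsalnum h then
    let c := pvDecode h
    if pvUNRESERVED.contains c then c :: PySem.List.slice p (some 2) none
    else '%' :: p
  else '%' :: p

def unquote_unreserved (uri : String) : String :=
  match PySem.Chars.splitOn uri.toList ['%'] with
  | [] => ""  -- unreachable: split always yields at least one part
  | p :: rest => String.ofList (PySem.Chars.join [] (p :: rest.map pvPartA))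

-- ===== PORT B =====
-- the while-loop of Source B: consuming the remaining characters is advancing the cursor
def pvScanB : List Char → List Char
  | [] => []
  | ch :: rest =>
    if ch = '%' then
      let h := rest.take 2          -- uri[i+1:i+3]
      if h.length = 2 && PySem.Chars.strIsalnum h then
        let c := pvDecode h
        if pvUNRESERVED.contains c then c :: pvScanB (rest.drop 2)   -- i += 3
        else '%' :: pvScanB rest                                      -- i += 1
      else '%' :: pvScanB rest
    else ch :: pvScanB rest
termination_by cs => cs.length
decreasing_by all_goals (simp; try omega)

def unquote_unreserved_alt (uri : String) : String := String.ofList (pvScanB uri.toList)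

-- ===== PRECONDITION & SPEC =====
def pvBadPair (a b : Char) : Bool :=
  PySem.Chars.isalnum a && PySem.Chars.isalnum b &&
    !((PySem.Chars.isdigit a || ('a' ≤ a && a ≤ 'f') || ('A' ≤ a && a ≤ 'F')) &&
      (PySem.Chars.isdigit b || ('a' ≤ b && b ≤ 'f') || ('A' ≤ b && b ≤ 'F')))

-- Pre_ excludes exactly the inputs where some '%' is followed by two alphanumeric characters
-- that are not both hex digits: there int(h, 16) raises ValueError in A (and in B alike).
def Pre_unquote_unreserved (uri : String) : Prop :=
  ∀ i < uri.toList.length,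
    uri.toList.getD i ' ' = '%' →
      pvBadPair (uri.toList.getD (i+1) ' ') (uri.toList.getD (i+2) ' ') = false
instance (uri : String) : Decidable (Pre_unquote_unreserved uri) := by
  unfold Pre_unquote_unreserved; infer_instance

def pvWitness_unquote_unreserved : String := "a%41%%20%x"

def Spec_unquote_unreserved (uri : String) (out : String) : Prop := out = unquote_unreserved_alt uri
instance (uri : String) (out : String) : Decidable (Spec_unquote_unreserved uri out) := by
  unfold Spec_unquote_unreserved; infer_instance

-- ===== CLAIM (what is proved, stated in full; the proofs are below) =====
def Claim_equal_unquote_unreserved : Prop := ∀ (uri : String), Dom_unquote_unreserved uri → Pre_unquote_unreserved uri → Spec_unquote_unreserved uri (unquote_unreserved uri)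

-- ===== LEMMAS AND PROOFS =====

-- ''.join as concatenation
lemma pvJoin_nil (l : List (List Char)) : PySem.Chars.join [] l = l.flatten := by
  unfold PySem.Chars.join
  induction l with
  | nil => simp [List.intercalate, List.intersperse]
  | cons p ps ih => cases ps <;> simp_all [List.intercalate, List.intersperse]

-- reference splitter: uri.split('%') as plain structural recursion (proof-side only)
def pvMySplit (pre : List Char) : List Char → List (List Char)
  | [] => [pre]
  | c :: rest => if c = '%' then pre :: pvMySplit [] rest else pvMySplit (pre ++ [c]) rest

lemma pvGo_pct (n : Nat) (rest cur : List Char) (acc : List (List Char)) :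
    PySem.Chars.splitOn.go ['%'] (n+1) ('%' :: rest) cur acc
      = PySem.Chars.splitOn.go ['%'] n rest [] (cur.reverse :: acc) := by
  simp [PySem.Chars.splitOn.go, List.isPrefixOf]

lemma pvGo_ne (n : Nat) (c : Char) (hc : c ≠ '%') (rest cur : List Char)
    (acc : List (List Char)) :
    PySem.Chars.splitOn.go ['%'] (n+1) (c :: rest) cur acc
      = PySem.Chars.splitOn.go ['%'] n rest (c :: cur) acc := by
  simp only [PySem.Chars.splitOn.go, List.isPrefixOf, Bool.and_true]
  rw [if_neg]
  simp [beq_iff_eq, Ne.symm hc]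

lemma pvGo_spec : ∀ (fuel : Nat) (l cur : List Char) (acc : List (List Char)),
    l.length < fuel →
    PySem.Chars.splitOn.go ['%'] fuel l cur acc = acc.reverse ++ pvMySplit cur.reverse l := by
  intro fuel
  induction fuel with
  | zero => intro l cur acc h; omega
  | succ n ih =>
    intro l cur acc h
    cases l with
    | nil => simp [PySem.Chars.splitOn.go, pvMySplit]
    | cons c rest =>
      by_cases hc : c = '%'
      · subst hc
        rw [pvGo_pct, ih rest [] (cur.reverse :: acc) (by simp at h; omega)]
        simp [pvMySplit]
      · rw [pvGo_ne n c hc, ih rest (c :: cur) acc (by simp at h; omega)]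
        simp [pvMySplit, hc]

lemma pvSplitOn_eq (cs : List Char) :
    PySem.Chars.splitOn cs ['%'] = pvMySplit [] cs := by
  have := pvGo_spec (cs.length + 1) cs [] [] (by omega)
  simpa [PySem.Chars.splitOn] using this

lemma pvMySplit_pre (cs : List Char) : ∀ pre,
    pvMySplit pre cs = (pre ++ (pvMySplit [] cs).headI) :: (pvMySplit [] cs).tail := by
  induction cs with
  | nil => intro pre; simp [pvMySplit]
  | cons c rest ih =>
    intro pre
    by_cases hc : c = '%'
    · subst hc; simp [pvMySplit]
    · simp only [pvMySplit, hc, if_false, List.nil_append]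
      rw [ih (pre ++ [c]), ih [c]]
      simp


lemma pvScanB_pct (rest : List Char) :
    pvScanB ('%' :: rest) =
      if (rest.take 2).length = 2 && PySem.Chars.strIsalnum (rest.take 2) then
        if pvUNRESERVED.contains (pvDecode (rest.take 2)) then
          pvDecode (rest.take 2) :: pvScanB (rest.drop 2)
        else '%' :: pvScanB rest
      else '%' :: pvScanB rest := by
  conv_lhs => rw [pvScanB]
  simp only [if_true]

lemma pvScanB_ne (ch : Char) (hc : ch ≠ '%') (rest : List Char) :
    pvScanB (ch :: rest) = ch :: pvScanB rest := by
  conv_lhs => rw [pvScanB]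
  simp only [if_neg hc]

-- the headI/tail shorthand for the scan invariant
def pvRes (cs : List Char) : List Char :=
  (pvMySplit [] cs).headI ++ (((pvMySplit [] cs).tail).map pvPartA).flatten

lemma pvScan_eq : ∀ (n : Nat) (cs : List Char), cs.length ≤ n → pvScanB cs = pvRes cs := by
  intro n
  induction n with
  | zero =>
    intro cs h
    have : cs = [] := by cases cs <;> simp_all
    subst this; simp [pvScanB, pvRes, pvMySplit]
  | succ n ih =>
    intro cs hlen
    cases cs with
    | nil => simp [pvScanB, pvRes, pvMySplit]
    | cons c rest =>
      by_cases hc : c = '%'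
      · subst hc
        have hsplit : pvMySplit [] ('%' :: rest) = [] :: pvMySplit [] rest := by
          simp [pvMySplit]
        have hrest : pvMySplit [] rest = (pvMySplit [] rest).headI :: (pvMySplit [] rest).tail := by
          have := pvMySplit_pre rest []
          simpa using this
        by_cases hcond : ((rest.take 2).length = 2 && PySem.Chars.strIsalnum (rest.take 2)) = true
        · -- rest = a :: b :: rest', a b alphanumeric (hence ≠ '%')
          obtain ⟨a, b, rest', rfl⟩ : ∃ a b rest', rest = a :: b :: rest' := by
            cases rest with
            | nil => simp at hcond
            | cons a t =>
              cases t with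
              | nil => simp at hcond
              | cons b t' => exact ⟨a, b, t', rfl⟩
          have halnum : PySem.Chars.isalnum a = true ∧ PySem.Chars.isalnum b = true := by
            simp [PySem.Chars.strIsalnum] at hcond
            tauto
          have ha : a ≠ '%' := by rintro rfl; exact absurd halnum.1 (by decide)
          have hb : b ≠ '%' := by rintro rfl; exact absurd halnum.2 (by decide)
          have hsplit2 : pvMySplit [] (a :: b :: rest')
              = (a :: b :: (pvMySplit [] rest').headI) :: (pvMySplit [] rest').tail := by
            simp only [pvMySplit, ha, hb, if_false, List.nil_append]
            rw [pvMySplit_pre rest' ([a] ++ [b])]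
            simp
          have hPartA : pvPartA (a :: b :: (pvMySplit [] rest').headI)
              = (if pvUNRESERVED.contains (pvDecode [a, b])
                 then pvDecode [a, b] :: (pvMySplit [] rest').headI
                 else '%' :: a :: b :: (pvMySplit [] rest').headI) := by
            have hs1 : PySem.List.slice (a :: b :: (pvMySplit [] rest').headI) (some 0) (some 2)
                = [a, b] := by simp [PySem.List.slice]
            have hs2 : PySem.List.slice (a :: b :: (pvMySplit [] rest').headI) (some 2) none
                = (pvMySplit [] rest').headI := by simp [PySem.List.slice]
            simp only [pvPartA, hs1, hs2]
            rw [if_pos]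
            simpa [PySem.Chars.strIsalnum] using halnum
          rw [show pvScanB ('%' :: a :: b :: rest')
              = (if pvUNRESERVED.contains (pvDecode [a, b])
                 then pvDecode [a, b] :: pvScanB rest'
                 else '%' :: pvScanB (a :: b :: rest')) by
            rw [pvScanB_pct (a :: b :: rest')]
            rw [if_pos hcond]
            rfl]
          by_cases hu : pvUNRESERVED.contains (pvDecode [a, b]) = true
          · rw [if_pos hu]
            rw [ih rest' (by simp at hlen; omega)]
            simp only [pvRes, hsplit, hsplit2, List.headI_cons, List.tail_cons, List.map_cons,
              List.flatten_cons, List.nil_append, hPartA, if_pos hu, List.cons_append]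
          · rw [if_neg hu]
            rw [ih (a :: b :: rest') (by simp at hlen ⊢; omega)]
            simp only [pvRes, hsplit, hsplit2, List.headI_cons, List.tail_cons, List.map_cons,
              List.flatten_cons, List.nil_append, hPartA, if_neg hu]
            simp
        · -- the 2-char check fails for B; it fails for A's first tail part too
          have hPartA : pvPartA (pvMySplit [] rest).headI = '%' :: (pvMySplit [] rest).headI := by
            unfold pvPartA
            rw [if_neg]
            cases rest with
            | nil => simp [pvMySplit, PySem.List.slice, PySem.Chars.strIsalnum]
            | cons a t =>
              by_cases hA : a = '%'
              · subst hA
                simp [pvMySplit, PySem.List.slice, PySem.Chars.strIsalnum]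
              · have h1 : pvMySplit [] (a :: t) = (a :: (pvMySplit [] t).headI) :: (pvMySplit [] t).tail := by
                  simp only [pvMySplit, hA, if_false, List.nil_append]
                  rw [pvMySplit_pre t [a]]
                  simp
                rw [h1]
                cases t with
                | nil =>
                  simp [pvMySplit, PySem.List.slice, PySem.Chars.strIsalnum]
                | cons b t' =>
                  by_cases hB : b = '%'
                  · subst hB
                    simp only [pvMySplit, List.headI]
                    simp [PySem.List.slice, PySem.Chars.strIsalnum]
                  · have h2 : pvMySplit [] (b :: t') = (b :: (pvMySplit [] t').headI) :: (pvMySplit [] t').tail := by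
                      simp only [pvMySplit, hB, if_false, List.nil_append]
                      rw [pvMySplit_pre t' [b]]
                      simp
                    rw [h2]
                    -- head part starts a :: b :: …, so the check agrees with B's on [a, b]
                    simp only [List.headI_cons]
                    intro hcontra
                    apply hcond
                    have hs1 : PySem.List.slice (a :: b :: (pvMySplit [] t').headI) (some 0) (some 2)
                        = [a, b] := by simp [PySem.List.slice]
                    simp only [hs1] at hcontra
                    simpa [List.take] using hcontra
          rw [show pvScanB ('%' :: rest) = '%' :: pvScanB rest by
            rw [pvScanB_pct rest, if_neg hcond]]
          rw [ih rest (by simp at hlen; omega)]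
          simp only [pvRes, hsplit, List.headI_cons, List.tail_cons]
          conv_rhs => rw [hrest]
          simp [hPartA]
      · have hsplit : pvMySplit [] (c :: rest)
            = (c :: (pvMySplit [] rest).headI) :: (pvMySplit [] rest).tail := by
          simp only [pvMySplit, hc, if_false, List.nil_append]
          rw [pvMySplit_pre rest [c]]
          simp
        rw [pvScanB_ne c hc rest]
        rw [ih rest (by simp at hlen; omega)]
        simp [pvRes, hsplit]

-- ===== VERDICT (by name: the statement is the Claim_ definition above) =====
theorem unquote_unreserved_spec : Claim_equal_unquote_unreserved := by
  intro uri _ _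
  unfold Spec_unquote_unreserved unquote_unreserved unquote_unreserved_alt
  rw [pvSplitOn_eq]
  have hsplit := pvMySplit_pre uri.toList []
  simp only [List.nil_append] at hsplit
  rw [hsplit, pvScan_eq uri.toList.length uri.toList le_rfl]
  simp [pvJoin_nil, pvRes]
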